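-- pv_equiv track=rewrite | github.com/Kelvin1761/Kelvin-Agents | .agents/scripts/inject_hkjc_fact_anchors.py | _compute_section_labels
-- ===== SOURCE A (Python) =====
-- def _compute_section_labels(distance: int, n_sections: int) -> list:
--     """Generate section labels like ['0-400m', '400-800m', ...]."""
--     if distance == 1000 and n_sections == 3:
--         return ['0-200m', '200-600m', '600-1000m']
--     elif distance == 1200 and n_sections == 3:
--         return ['0-400m', '400-800m', '800-1200m']
--     elif distance == 1400 and n_sections == 4:
--         return ['0-200m', '200-600m', '600-1000m', '1000-1400m']
--     elif distance == 1600 and n_sections == 4: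
--         return ['0-400m', '400-800m', '800-1200m', '1200-1600m']
--     elif distance == 1800 and n_sections == 5:
--         return ['0-200m', '200-600m', '600-1000m', '1000-1400m', '1400-1800m']
--     elif distance == 2000 and n_sections == 5:
--         return ['0-400m', '400-800m', '800-1200m', '1200-1600m', '1600-2000m']
--     elif distance == 2200 and n_sections == 6:
--         return ['0-200m', '200-600m', '600-1000m', '1000-1400m', '1400-1800m', '1800-2200m']
--     elif distance == 2400 and n_sections == 6:
--         return ['0-400m', '400-800m', '800-1200m', '1200-1600m', '1600-2000m', '2000-2400m']
--     else:
--         return [f'S{i+1}' for i in range(n_sections)]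
-- ===== SOURCE B (Python) =====
-- _VALID_PAIRS = {(1000, 3), (1200, 3), (1400, 4), (1600, 4),
--                 (1800, 5), (2000, 5), (2200, 6), (2400, 6)}
--
--
-- def _compute_section_labels(distance: int, n_sections: int) -> list:
--     """Generate section labels like ['0-400m', '400-800m', ...]."""
--     if (distance, n_sections) in _VALID_PAIRS:
--         if distance == 400 * n_sections:
--             boundaries = [400 * i for i in range(n_sections + 1)]
--         else:
--             boundaries = [0] + [200 + 400 * i for i in range(n_sections)]
--         return [f'{a}-{b}m' for a, b in zip(boundaries, boundaries[1:])]
--     return ['S' + str(i) for i in range(1, n_sections + 1)]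
-- ===== Notes on version B (the rewrite author's own statement) =====
-- stated objective: simpler
-- what changed: Replaces the 8-branch hardcoded label tables with a membership test on the 8 valid (distance, n_sections) pairs plus arithmetic computation of the section boundaries, zipped into labels.
import Mathlib
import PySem

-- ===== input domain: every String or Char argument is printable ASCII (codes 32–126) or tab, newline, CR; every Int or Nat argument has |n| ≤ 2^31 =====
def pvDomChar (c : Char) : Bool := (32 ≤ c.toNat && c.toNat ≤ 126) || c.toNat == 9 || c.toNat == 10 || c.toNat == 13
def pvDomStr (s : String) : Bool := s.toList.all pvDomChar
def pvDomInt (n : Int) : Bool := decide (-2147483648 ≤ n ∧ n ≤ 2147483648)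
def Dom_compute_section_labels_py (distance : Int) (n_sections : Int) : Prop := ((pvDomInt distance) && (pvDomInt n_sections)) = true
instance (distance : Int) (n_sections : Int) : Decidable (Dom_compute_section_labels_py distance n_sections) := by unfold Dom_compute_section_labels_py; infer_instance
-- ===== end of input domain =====

-- B replaces the hardcoded 8-branch label tables with a membership test on the valid pairs
-- plus arithmetic boundaries zipped into labels (objective: simpler).
-- ===== PORT A =====
def compute_section_labels_py (distance : Int) (n_sections : Int) : List String :=
  if distance = 1000 ∧ n_sections = 3 then ["0-200m", "200-600m", "600-1000m"]
  else if distance = 1200 ∧ n_sections = 3 then ["0-400m", "400-800m", "800-1200m"]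
  else if distance = 1400 ∧ n_sections = 4 then ["0-200m", "200-600m", "600-1000m", "1000-1400m"]
  else if distance = 1600 ∧ n_sections = 4 then ["0-400m", "400-800m", "800-1200m", "1200-1600m"]
  else if distance = 1800 ∧ n_sections = 5 then ["0-200m", "200-600m", "600-1000m", "1000-1400m", "1400-1800m"]
  else if distance = 2000 ∧ n_sections = 5 then ["0-400m", "400-800m", "800-1200m", "1200-1600m", "1600-2000m"]
  else if distance = 2200 ∧ n_sections = 6 then ["0-200m", "200-600m", "600-1000m", "1000-1400m", "1400-1800m", "1800-2200m"]
  else if distance = 2400 ∧ n_sections = 6 then ["0-400m", "400-800m", "800-1200m", "1200-1600m", "1600-2000m", "2000-2400m"]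
  else (PySem.List.pyRange 0 n_sections 1).map (fun i => "S" ++ PySem.Int.toStr (i + 1))

-- ===== PORT B =====
def pvValidPairs : List (Int × Int) :=
  [(1000, 3), (1200, 3), (1400, 4), (1600, 4), (1800, 5), (2000, 5), (2200, 6), (2400, 6)]

def compute_section_labels_py_alt (distance : Int) (n_sections : Int) : List String :=
  if pvValidPairs.contains (distance, n_sections) then
    let boundaries : List Int :=
      if distance = 400 * n_sections then
        (PySem.List.pyRange 0 (n_sections + 1) 1).map (fun i => 400 * i)
      else
        0 :: (PySem.List.pyRange 0 n_sections 1).map (fun i => 200 + 400 * i)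
    (boundaries.zip (boundaries.drop 1)).map
      (fun p => PySem.Int.toStr p.1 ++ "-" ++ PySem.Int.toStr p.2 ++ "m")
  else (PySem.List.pyRange 1 (n_sections + 1) 1).map (fun i => "S" ++ PySem.Int.toStr i)

-- ===== PRECONDITION & SPEC =====
def Spec_compute_section_labels_py (distance : Int) (n_sections : Int) (out : List String) : Prop := out = compute_section_labels_py_alt distance n_sections
instance (distance : Int) (n_sections : Int) (out : List String) : Decidable (Spec_compute_section_labels_py distance n_sections out) := by unfold Spec_compute_section_labels_py; infer_instance

-- ===== CLAIM (what is proved, stated in full; the proofs are below) =====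
def Claim_equal_compute_section_labels_py : Prop := ∀ (distance : Int) (n_sections : Int), Dom_compute_section_labels_py distance n_sections → Spec_compute_section_labels_py distance n_sections (compute_section_labels_py distance n_sections)

-- ===== LEMMAS AND PROOFS =====
-- The two S-fallback comprehensions enumerate the same labels: A over range(n) with i+1, B over range(1, n+1).
theorem pv_fallback_eq (n : Int) :
    (PySem.List.pyRange 0 n 1).map (fun i => "S" ++ PySem.Int.toStr (i + 1)) =
    (PySem.List.pyRange 1 (n + 1) 1).map (fun i => "S" ++ PySem.Int.toStr i) := by
  rw [PySem.List.pyRange_one, PySem.List.pyRange_one, List.map_map, List.map_map]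
  simp only [Int.add_sub_cancel, Int.sub_zero]
  apply List.map_congr_left
  intro k _
  simp only [Function.comp_apply]
  congr 2
  omega

-- ===== VERDICT (by name: the statement is the Claim_ definition above) =====
theorem compute_section_labels_py_spec : Claim_equal_compute_section_labels_py := by
  intro distance n_sections _
  unfold Spec_compute_section_labels_py
  by_cases h1 : distance = 1000 ∧ n_sections = 3
  · obtain ⟨rfl, rfl⟩ := h1; decide
  by_cases h2 : distance = 1200 ∧ n_sections = 3
  · obtain ⟨rfl, rfl⟩ := h2; decide
  by_cases h3 : distance = 1400 ∧ n_sections = 4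
  · obtain ⟨rfl, rfl⟩ := h3; decide
  by_cases h4 : distance = 1600 ∧ n_sections = 4
  · obtain ⟨rfl, rfl⟩ := h4; decide
  by_cases h5 : distance = 1800 ∧ n_sections = 5
  · obtain ⟨rfl, rfl⟩ := h5; decide
  by_cases h6 : distance = 2000 ∧ n_sections = 5
  · obtain ⟨rfl, rfl⟩ := h6; decide
  by_cases h7 : distance = 2200 ∧ n_sections = 6
  · obtain ⟨rfl, rfl⟩ := h7; decide
  by_cases h8 : distance = 2400 ∧ n_sections = 6
  · obtain ⟨rfl, rfl⟩ := h8; decide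
  have hm : pvValidPairs.contains (distance, n_sections) = false := by
    simp only [pvValidPairs, List.contains_cons, List.contains_nil, Prod.mk.injEq,
      Bool.or_eq_false_iff, beq_eq_false_iff_ne, ne_eq]
    refine ⟨?_, ?_, ?_, ?_, ?_, ?_, ?_, ?_, trivial⟩
    exacts [h1, h2, h3, h4, h5, h6, h7, h8]
  unfold compute_section_labels_py compute_section_labels_py_alt
  rw [if_neg h1, if_neg h2, if_neg h3, if_neg h4, if_neg h5, if_neg h6, if_neg h7, if_neg h8, hm]
  exact pv_fallback_eq n_sections
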